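-- pv_equiv track=rewrite | github.com/Davvi-Duarte/prog1 | unidade6/contaalertas/contaalertas.py | conta_alertas_acude
-- ===== SOURCE A (Python) =====
-- def conta_alertas_acude(lista):
--     cont=0
--     for i in range(len(lista)):
--         if lista[i]<17:
--             if i== 0:
--                 if abs(lista[i]-17)<10:
--                     cont+=1
--             else:
--                 if abs(lista[i]-lista[i-1])<10:
--                     cont+=1
--     return cont
-- ===== SOURCE B (Python) =====
-- def conta_alertas_acude(lista):
--     # Divide and conquer: alerts in a segment depend only on each element's
--     # immediate predecessor, so count(seg, prev) splits at the midpoint and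
--     # the right half's predecessor is the left half's last element.
--     def count(seg, prev):
--         if not seg:
--             return 0
--         if len(seg) == 1:
--             c = seg[0]
--             return 1 if c < 17 and abs(c - prev) < 10 else 0
--         mid = len(seg) // 2
--         return count(seg[:mid], prev) + count(seg[mid:], seg[mid - 1])
--     return count(lista, 17)
-- ===== Notes on version B (the rewrite author's own statement) =====
-- stated objective: alternative
-- what changed: Replaces A's single index loop with a divide-and-conquer recursion: the count of a segment given its virtual predecessor is the count of the left half plus the count of the right half with the left half's last element as predecessor; no index loop, no i==0 branch, O(log n) recursion depth.
import Mathlib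
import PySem

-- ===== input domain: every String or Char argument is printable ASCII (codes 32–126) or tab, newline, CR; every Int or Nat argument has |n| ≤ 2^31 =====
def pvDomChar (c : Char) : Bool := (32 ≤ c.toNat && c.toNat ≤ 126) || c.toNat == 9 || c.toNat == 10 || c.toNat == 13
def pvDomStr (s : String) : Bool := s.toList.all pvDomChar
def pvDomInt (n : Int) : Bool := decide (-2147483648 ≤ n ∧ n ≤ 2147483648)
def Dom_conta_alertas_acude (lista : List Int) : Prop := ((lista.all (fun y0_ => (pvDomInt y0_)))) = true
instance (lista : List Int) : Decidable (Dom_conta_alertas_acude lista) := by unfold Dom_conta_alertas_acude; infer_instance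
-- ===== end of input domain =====

-- B counts by divide and conquer (left half with the virtual predecessor, right half
-- with the left half's last element as predecessor) instead of A's index loop.

-- ===== PORT A =====
def conta_alertas_acude (lista : List Int) : Int :=
  (PySem.List.pyRange 0 lista.length 1).foldl (fun cont i =>
    if PySem.List.pyGetD lista i 0 < 17 then
      if i = 0 then
        if |PySem.List.pyGetD lista i 0 - 17| < 10 then cont + 1 else cont
      else
        if |PySem.List.pyGetD lista i 0 - PySem.List.pyGetD lista (i - 1) 0| < 10 then cont + 1
        else cont
    else cont) 0

-- ===== PORT B =====
-- helper 'count(seg, prev)' from Source B: divide and conquer on the segment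
def pvCount (seg : List Int) (prev : Int) : Int :=
  if seg = [] then 0
  else if seg.length = 1 then
    (if PySem.List.pyGetD seg 0 0 < 17 ∧ |PySem.List.pyGetD seg 0 0 - prev| < 10 then 1 else 0)
  else
    pvCount (PySem.List.slice seg none (some ((seg.length / 2 : Nat) : Int))) prev
      + pvCount (PySem.List.slice seg (some ((seg.length / 2 : Nat) : Int)) none)
          (PySem.List.pyGetD seg (((seg.length / 2 : Nat) : Int) - 1) 0)
termination_by seg.length
decreasing_by
  · rw [PySem.List.slice_to_natCast]
    rename_i h1 h2
    have : seg.length ≠ 0 := fun h => h1 (List.eq_nil_of_length_eq_zero h)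
    simp only [List.length_take]
    omega
  · rw [PySem.List.slice_from_natCast]
    rename_i h1 h2
    have : seg.length ≠ 0 := fun h => h1 (List.eq_nil_of_length_eq_zero h)
    simp only [List.length_drop]
    omega

def conta_alertas_acude_alt (lista : List Int) : Int := pvCount lista 17

-- ===== PRECONDITION & SPEC =====
def Spec_conta_alertas_acude (lista : List Int) (out : Int) : Prop := out = conta_alertas_acude_alt lista
instance (lista : List Int) (out : Int) : Decidable (Spec_conta_alertas_acude lista out) := by unfold Spec_conta_alertas_acude; infer_instance

-- ===== CLAIM =====
def Claim_equal_conta_alertas_acude : Prop := ∀ (lista : List Int), Dom_conta_alertas_acude lista → Spec_conta_alertas_acude lista (conta_alertas_acude lista)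

-- ===== LEMMAS AND PROOFS =====

-- reference count: predecessor-carrying linear recursion
def pvCnt (p : Int) : List Int → Int
  | [] => 0
  | c :: rest => (if c < 17 ∧ |c - p| < 10 then 1 else 0) + pvCnt c rest

-- splitting the linear count at any point
lemma pvCnt_append (l1 : List Int) : ∀ (l2 : List Int) (p : Int),
    pvCnt p (l1 ++ l2) = pvCnt p l1 + pvCnt (l1.getLastD p) l2 := by
  induction l1 with
  | nil => intro l2 p; simp [pvCnt, List.getLastD]
  | cons x xs ih =>
      intro l2 p
      simp only [List.cons_append, pvCnt, ih l2 x, List.getLastD_cons]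
      ring

-- the divide-and-conquer count equals the linear count
lemma pvCount_eq (n : Nat) : ∀ (seg : List Int) (p : Int), seg.length ≤ n →
    pvCount seg p = pvCnt p seg := by
  induction n with
  | zero =>
      intro seg p h
      have : seg = [] := List.eq_nil_of_length_eq_zero (Nat.le_zero.mp h)
      subst this; simp [pvCount, pvCnt]
  | succ n ih =>
      intro seg p h
      by_cases h0 : seg = []
      · subst h0; simp [pvCount, pvCnt]
      by_cases h1 : seg.length = 1
      · obtain ⟨c, rfl⟩ : ∃ c, seg = [c] := by
          cases seg with
          | nil => exact absurd rfl h0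
          | cons a t =>
              cases t with
              | nil => exact ⟨a, rfl⟩
              | cons b t' => simp at h1
        simp [pvCount, pvCnt, PySem.List.pyGetD_zero_cons]
      · have hlen : 2 ≤ seg.length := by
          have : seg.length ≠ 0 := fun hh => h0 (List.eq_nil_of_length_eq_zero hh)
          omega
        have hmid1 : 1 ≤ seg.length / 2 := by omega
        have hmidlt : seg.length / 2 < seg.length := by omega
        rw [pvCount, if_neg h0, if_neg h1, PySem.List.slice_to_natCast,
          PySem.List.slice_from_natCast]
        have hgc : (((seg.length / 2 : Nat) : Int)) - 1 = (((seg.length / 2 - 1 : Nat)) : Int) := by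
          push_cast [hmid1]; omega
        rw [hgc, PySem.List.pyGetD_natCast]
        have hget : seg.getD (seg.length / 2 - 1) 0 = seg[seg.length / 2 - 1]'(by omega) :=
          List.getD_eq_getElem seg 0 (by omega)
        have htk : (seg.take (seg.length / 2)).length ≤ n := by
          simp only [List.length_take]; omega
        have hdp : (seg.drop (seg.length / 2)).length ≤ n := by
          simp only [List.length_drop]; omega
        rw [ih _ _ htk, ih _ _ hdp]
        have hlast : (seg.take (seg.length / 2)).getLastD p = seg[seg.length / 2 - 1]'(by omega) := by
          have hne : seg.take (seg.length / 2) ≠ [] := by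
            intro hh
            have := congrArg List.length hh
            simp only [List.length_take, List.length_nil] at this
            omega
          rw [List.getLastD_eq_getLast? , List.getLast?_eq_getElem?]
          simp only [List.length_take, Nat.min_eq_left (Nat.le_of_lt hmidlt)]
          rw [List.getElem?_take, if_pos (by omega)]
          simp [List.getElem?_eq_getElem (by omega : seg.length / 2 - 1 < seg.length)]
        rw [hget, ← hlast, ← pvCnt_append, List.take_append_drop]

-- A's loop from index (pre' ++ [p]).length over (pre' ++ [p]) ++ l counts l with predecessor p
lemma pv_A_loop (l : List Int) : ∀ (pre' : List Int) (p c : Int),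
    (PySem.List.pyRange ((pre' ++ [p]).length) ((pre' ++ [p]).length + l.length) 1).foldl
      (fun cont i =>
        if PySem.List.pyGetD ((pre' ++ [p]) ++ l) i 0 < 17 then
          if i = 0 then
            if |PySem.List.pyGetD ((pre' ++ [p]) ++ l) i 0 - 17| < 10 then cont + 1 else cont
          else
            if |PySem.List.pyGetD ((pre' ++ [p]) ++ l) i 0
                 - PySem.List.pyGetD ((pre' ++ [p]) ++ l) (i - 1) 0| < 10 then cont + 1
            else cont
        else cont) c
      = c + pvCnt p l := by
  induction l with
  | nil => intro pre' p c; simp [PySem.List.pyRange_one_eq_nil, pvCnt]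
  | cons x rest ih =>
      intro pre' p c
      have hlt : (((pre' ++ [p]).length : Int)) < ((pre' ++ [p]).length : Int) + ((x :: rest).length : Int) := by
        simp only [List.length_append, List.length_cons, List.length_nil]; push_cast; omega
      rw [PySem.List.pyRange_one_cons hlt, List.foldl_cons]
      have hne : ¬ (((pre' ++ [p]).length : Int) = 0) := by
        simp only [List.length_append, List.length_cons, List.length_nil]; push_cast; omega
      have hget : PySem.List.pyGetD ((pre' ++ [p]) ++ x :: rest) ((pre' ++ [p]).length : Int) 0 = x := by
        rw [PySem.List.pyGetD_natCast,
          List.getD_append_right (pre' ++ [p]) (x :: rest) 0 _ (Nat.le_refl _)]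
        simp
      have hm1 : (((pre' ++ [p]).length : Int)) - 1 = (pre'.length : Int) := by
        simp only [List.length_append, List.length_cons, List.length_nil]; push_cast; ring
      have hassoc : (pre' ++ [p]) ++ x :: rest = pre' ++ p :: (x :: rest) := by simp
      have hget2 : PySem.List.pyGetD ((pre' ++ [p]) ++ x :: rest) (((pre' ++ [p]).length : Int) - 1) 0 = p := by
        rw [hm1, PySem.List.pyGetD_natCast, hassoc,
          List.getD_append_right pre' (p :: (x :: rest)) 0 _ (Nat.le_refl _)]
        simp
      simp only [hget, hget2, if_neg hne]
      have e1 : (((pre' ++ [p]).length : Int)) + 1 = (((pre' ++ [p]) ++ [x]).length : Int) := by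
        simp only [List.length_append, List.length_cons, List.length_nil]; push_cast; ring
      have e2 : (((pre' ++ [p]).length : Int)) + ((x :: rest).length : Int)
          = (((pre' ++ [p]) ++ [x]).length : Int) + (rest.length : Int) := by
        simp only [List.length_append, List.length_cons, List.length_nil]; push_cast; ring
      have e3 : (pre' ++ [p]) ++ x :: rest = ((pre' ++ [p]) ++ [x]) ++ rest := by simp
      rw [e1, e2, e3, ih ((pre' ++ [p])) x]
      simp only [pvCnt, ← ite_and]
      generalize pvCnt x rest = q
      split_ifs <;> ring

-- ===== VERDICT =====
theorem conta_alertas_acude_spec : Claim_equal_conta_alertas_acude := by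
  intro lista _
  show conta_alertas_acude lista = pvCount lista 17
  rw [pvCount_eq lista.length lista 17 (Nat.le_refl _)]
  unfold conta_alertas_acude
  cases lista with
  | nil => simp [PySem.List.pyRange_one_eq_nil, pvCnt]
  | cons x rest =>
      have hlt : (0 : Int) < ((x :: rest).length : Int) := by simp only [List.length_cons]; push_cast; omega
      rw [PySem.List.pyRange_one_cons hlt, List.foldl_cons]
      simp only [PySem.List.pyGetD_zero_cons, reduceIte]
      have e1 : (0 : Int) + 1 = ((([] ++ [x] : List Int)).length : Int) := by simp
      have e2 : ((x :: rest).length : Int) = ((([] ++ [x] : List Int)).length : Int) + (rest.length : Int) := by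
        simp only [List.length_append, List.length_cons, List.length_nil]; push_cast; omega
      have e3 : x :: rest = (([] : List Int) ++ [x]) ++ rest := rfl
      rw [e1, e2, e3, pv_A_loop rest [] x]
      simp only [List.nil_append, List.singleton_append, List.length_singleton, Nat.cast_one, pvCnt, ← ite_and]
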